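-- pv_equiv track=rewrite | github.com/Ifinitysystem/cmpsc | PSX.py | is_snaky
-- ===== SOURCE A (Python) =====
-- def is_snaky(num):
--     assert isinstance(num, int) and num > 0
--
--     def transform(n):
--         if n < 10:
--             return n
--         result = 0
--         while n >= 10:
--             a = n % 10
--             b = (n // 10) % 10
--             result += a * b
--             n = n // 10
--         return result
--
--     slow = num
--     fast = transform(num)
--
--     while fast != 5 and slow != fast:
--         slow = transform(slow)
--         fast = transform(transform(fast))
--
--     return fast == 5
-- ===== SOURCE B (Python) =====
-- def is_snaky(num):
--     assert isinstance(num, int) and num > 0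
--
--     def transform(n):
--         if n < 10:
--             return n
--         result = 0
--         while n >= 10:
--             a = n % 10
--             b = (n // 10) % 10
--             result += a * b
--             n = n // 10
--         return result
--
--     # transform(n) < n for every n >= 10, so the orbit strictly decreases
--     # until it hits a single-digit fixed point; no cycle detection is needed.
--     while num >= 10:
--         num = transform(num)
--     return num == 5
-- ===== Notes on version B (the rewrite author's own statement) =====
-- stated objective: simpler
-- what changed: Replaced Floyd's slow/fast two-pointer cycle detection with a plain descent loop: since transform(n) < n for every n >= 10, the orbit strictly decreases to a single-digit fixed point, so B just iterates transform until the value is below 10 and compares it with 5.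
import Mathlib
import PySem

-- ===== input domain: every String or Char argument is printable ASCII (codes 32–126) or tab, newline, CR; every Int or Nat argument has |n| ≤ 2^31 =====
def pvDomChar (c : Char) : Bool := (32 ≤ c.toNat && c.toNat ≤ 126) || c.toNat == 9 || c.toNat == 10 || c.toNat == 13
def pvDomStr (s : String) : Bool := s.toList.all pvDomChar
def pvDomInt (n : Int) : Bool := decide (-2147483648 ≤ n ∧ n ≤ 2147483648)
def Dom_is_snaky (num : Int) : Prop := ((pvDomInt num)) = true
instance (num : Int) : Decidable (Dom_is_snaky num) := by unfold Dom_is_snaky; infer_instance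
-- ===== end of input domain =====

-- B replaces Floyd's slow/fast cycle detection with a plain descent loop
-- (transform strictly decreases values ≥ 10), for simplicity; the `transform`
-- helper is identical in both Pythons and shared here.
-- Fuel parameters only make the Python while-loops total; each fuel is proved sufficient below.

-- ===== PORT A =====
-- the inner `while n >= 10` loop of `transform` (identical in A and B)
def tloopF : Nat → Int → Int → Int
  | 0, _, result => result
  | fuel + 1, n, result =>
      if 10 ≤ n then
        tloopF fuel (PySem.Int.floordiv n 10)
          (result + PySem.Int.mod n 10 * PySem.Int.mod (PySem.Int.floordiv n 10) 10)
      else result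

def transform (n : Int) : Int := if n < 10 then n else tloopF (n.toNat + 1) n 0

-- A's Floyd loop
def floyd (fuel : Nat) (slow fast : Int) : Bool :=
  match fuel with
  | 0 => fast == 5
  | fuel + 1 =>
      if fast ≠ 5 ∧ slow ≠ fast then
        floyd fuel (transform slow) (transform (transform fast))
      else fast == 5

def is_snaky (num : Int) : Bool := floyd (num.toNat + 1) num (transform num)

-- ===== PORT B =====
-- B's `while num >= 10: num = transform(num)` loop
def bloopF : Nat → Int → Int
  | 0, num => num
  | fuel + 1, num => if 10 ≤ num then bloopF fuel (transform num) else num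

def is_snaky_alt (num : Int) : Bool := bloopF (num.toNat + 1) num == 5

-- ===== PRECONDITION & SPEC =====
-- A asserts `num > 0` (AssertionError otherwise), so Pre_ admits exactly the positive ints
def Pre_is_snaky (num : Int) : Prop := 0 < num
instance (num : Int) : Decidable (Pre_is_snaky num) := by unfold Pre_is_snaky; infer_instance
def pvWitness_is_snaky : Int := (7)

def Spec_is_snaky (num : Int) (out : Bool) : Prop := out = is_snaky_alt num
instance (num : Int) (out : Bool) : Decidable (Spec_is_snaky num out) := by unfold Spec_is_snaky; infer_instance

-- ===== CLAIM (what is proved, stated in full; the proofs are below) =====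
def Claim_equal_is_snaky : Prop := ∀ (num : Int), Dom_is_snaky num → Pre_is_snaky num → Spec_is_snaky num (is_snaky num)

-- ===== LEMMAS AND PROOFS =====

theorem tloopF_stop (fuel : Nat) (n x : Int) (h : ¬ 10 ≤ n) : tloopF fuel n x = x := by
  cases fuel with
  | zero => rfl
  | succ fuel => simp [tloopF, h]

theorem tloopF_bound : ∀ (fuel : Nat) (n r : Int), n.toNat < fuel → 10 ≤ n →
    r ≤ tloopF fuel n r ∧ tloopF fuel n r < r + n := by
  intro fuel
  induction fuel with
  | zero => intro n r hf hn; omega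
  | succ fuel ih =>
    intro n r hf hn
    rw [tloopF]
    simp only [hn, if_pos]
    rw [PySem.Int.floordiv_eq_ediv_of_pos (by omega : (0:Int) < 10),
        PySem.Int.mod_eq_emod_of_pos (by omega : (0:Int) < 10),
        PySem.Int.mod_eq_emod_of_pos (by omega : (0:Int) < 10)]
    have ha : 0 ≤ n % 10 ∧ n % 10 ≤ 9 := by omega
    have hb : 0 ≤ (n / 10) % 10 ∧ (n / 10) % 10 ≤ 9 := by omega
    have hprod0 : 0 ≤ n % 10 * ((n / 10) % 10) := mul_nonneg ha.1 hb.1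
    by_cases hm : 10 ≤ n / 10
    · have := ih (n / 10) (r + n % 10 * ((n / 10) % 10)) (by omega) hm
      have hprod : n % 10 * ((n / 10) % 10) ≤ 81 := by
        calc n % 10 * ((n / 10) % 10) ≤ 9 * ((n / 10) % 10) :=
              mul_le_mul_of_nonneg_right ha.2 hb.1
          _ ≤ 9 * 9 := by omega
          _ = 81 := rfl
      omega
    · rw [tloopF_stop fuel _ _ hm]
      have hm1 : 1 ≤ n / 10 := by omega
      have hbm : (n / 10) % 10 = n / 10 := by omega
      have hprod : n % 10 * ((n / 10) % 10) ≤ 9 * (n / 10) := by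
        calc n % 10 * ((n / 10) % 10) ≤ 9 * ((n / 10) % 10) :=
              mul_le_mul_of_nonneg_right ha.2 hb.1
          _ = 9 * (n / 10) := by rw [hbm]
      omega

theorem transform_lt (n : Int) (hn : 10 ≤ n) : 0 ≤ transform n ∧ transform n < n := by
  have := tloopF_bound (n.toNat + 1) n 0 (by omega) hn
  unfold transform
  simp only [show ¬ n < 10 by omega, if_neg, not_false_iff]
  omega

theorem transform_fix (n : Int) (hn : n < 10) : transform n = n := by
  unfold transform; simp [hn]

theorem iterate_fix (n : Int) (hn : n < 10) (k : Nat) : transform^[k] n = n := by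
  induction k with
  | zero => rfl
  | succ k ih => rw [Function.iterate_succ_apply, transform_fix n hn, ih]

theorem iterate_le (n : Int) (hn : 0 ≤ n) (k : Nat) :
    0 ≤ transform^[k] n ∧ transform^[k] n ≤ n := by
  induction k with
  | zero => exact ⟨hn, le_refl n⟩
  | succ k ih =>
    rw [Function.iterate_succ_apply']
    rcases ih with ⟨h0, hle⟩
    by_cases h10 : 10 ≤ transform^[k] n
    · have := transform_lt _ h10
      omega
    · rw [transform_fix _ (by omega)]; omega

-- bloopF does not depend on the fuel once the fuel exceeds the start value
theorem bloopF_irrel : ∀ (f1 : Nat) (f2 : Nat) (n : Int), n.toNat < f1 → n.toNat < f2 →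
    bloopF f1 n = bloopF f2 n := by
  intro f1
  induction f1 with
  | zero => intro f2 n h1 h2; omega
  | succ f1 ih =>
    intro f2 n h1 h2
    cases f2 with
    | zero => omega
    | succ f2 =>
      rw [bloopF, bloopF]
      by_cases h : 10 ≤ n
      · simp only [h, if_pos]
        have := transform_lt n h
        exact ih f2 (transform n) (by omega) (by omega)
      · simp only [h, if_neg, not_false_iff]

-- proof-side name for B's loop at its actual fuel
def bloop (n : Int) : Int := bloopF (n.toNat + 1) n

theorem bloop_small (n : Int) (hn : n < 10) : bloop n = n := by
  unfold bloop
  rw [bloopF]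
  simp [show ¬ 10 ≤ n by omega]

theorem bloop_transform (n : Int) : bloop (transform n) = bloop n := by
  by_cases h : 10 ≤ n
  · have ht := transform_lt n h
    unfold bloop
    conv_rhs => rw [bloopF]
    simp only [h, if_pos]
    exact bloopF_irrel ((transform n).toNat + 1) (n.toNat) (transform n) (by omega) (by omega)
  · rw [transform_fix n (by omega)]

theorem bloop_iterate (n : Int) (k : Nat) : bloop (transform^[k] n) = bloop n := by
  induction k with
  | zero => rfl
  | succ k ih => rw [Function.iterate_succ_apply', bloop_transform, ih]

-- the main invariant: fast is a (j+1)-step transform image of slow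
theorem floyd_correct (fuel : Nat) (slow fast : Int) (j : Nat)
    (hfuel : slow.toNat < fuel) (hpos : 0 ≤ slow)
    (hfast : fast = transform^[j + 1] slow) :
    floyd fuel slow fast = (bloop slow == 5) := by
  induction fuel generalizing slow fast j with
  | zero => omega
  | succ fuel ih =>
    rw [floyd]
    by_cases hsmall : slow < 10
    · -- slow is a fixed point: fast = slow, the guard fails
      have hfs : fast = slow := by rw [hfast, iterate_fix slow hsmall]
      have hng : ¬ (fast ≠ 5 ∧ slow ≠ fast) := by
        intro ⟨_, hne⟩; exact hne hfs.symm
      rw [if_neg hng]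
      rw [bloop_small slow hsmall, hfs]
    · -- slow ≥ 10: slow ≠ fast always, since fast < slow
      have h10 : (10 : Int) ≤ slow := by omega
      have htlt := transform_lt slow h10
      have hfl : fast < slow := by
        rw [hfast, Function.iterate_succ_apply]
        have := iterate_le (transform slow) htlt.1 j
        omega
      by_cases h5 : fast = 5
      · have hne : ¬ (fast ≠ 5 ∧ slow ≠ fast) := by intro ⟨h, _⟩; exact h h5
        rw [if_neg hne]
        have : bloop slow = 5 := by
          rw [← bloop_iterate slow (j + 1), ← hfast, h5, bloop_small 5 (by omega)]
        rw [h5, this]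
      · have hg : (fast ≠ 5 ∧ slow ≠ fast) := ⟨h5, by omega⟩
        rw [if_pos hg]
        rw [ih (transform slow) (transform (transform fast)) (j + 1)
              (by omega) htlt.1
              (by rw [hfast]
                  rw [← Function.iterate_succ_apply' transform,
                      ← Function.iterate_succ_apply' transform,
                      ← Function.iterate_succ_apply transform]),
            bloop_transform]

-- ===== VERDICT (by name: the statement is the Claim_ definition above) =====
theorem is_snaky_spec : Claim_equal_is_snaky := by
  intro num _ hpre
  unfold Spec_is_snaky is_snaky is_snaky_alt
  exact floyd_correct (num.toNat + 1) num (transform num) 0 (by omega) (by exact le_of_lt hpre)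
    (by rw [Function.iterate_one])
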